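-- pv_equiv track=rewrite | github.com/thomsoren/Algdat | Oppgaver/sheetcutting.py | sheet_cutting_aux
-- ===== SOURCE A (Python) =====
-- def sheet_cutting_aux(w, h, p, r):
--     if w == 0 or h == 0:
--         return 0
--     if r[w][h] >= 0:
--         return r[w][h]
--     q = p.get((w,h),0)
--     for i in range(1, w):
--         q = max(q, sheet_cutting_aux(i,h,p,r) + sheet_cutting_aux(w-i,h,p,r))
--     for j in range(1, h):
--         q = max(q, sheet_cutting_aux(w, j, p, r) + sheet_cutting_aux(w, h-j, p, r))
--     r[w][h] = q
--     return q
-- ===== SOURCE B (Python) =====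
-- def sheet_cutting_aux(w, h, p, r):
--     # Bottom-up iterative DP instead of memoized recursion (return value equal to A's;
--     # both fill r in place, B may fill cells behind pre-filled memo entries that A skips).
--     if w == 0 or h == 0:
--         return 0
--     for ww in range(1, w + 1):
--         for hh in range(1, h + 1):
--             if r[ww][hh] >= 0:
--                 continue
--             q = p.get((ww, hh), 0)
--             for i in range(1, ww):
--                 q = max(q, r[i][hh] + r[ww - i][hh])
--             for j in range(1, hh):
--                 q = max(q, r[ww][j] + r[ww][hh - j])
--             r[ww][hh] = q
--     return r[w][h]
-- ===== Notes on version B (the rewrite author's own statement) =====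
-- stated objective: alternative
-- what changed: A's top-down memoized recursion over (w,h) is replaced by a bottom-up iterative DP that fills the table in row-major order with the same recurrence, skipping pre-filled memo cells (>= 0) exactly as A does; both fill the same table, so same asymptotic cost.
-- outside the precondition, e.g. on sheet_cutting_aux(-1, 1, {}, [[-1, -1], [-1, -1]]): A returns 0, B returns -1; on sheet_cutting_aux(2, 1, {}, [[], [9], [0, 0]]): A returns 0, B raises IndexError
import Mathlib
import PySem

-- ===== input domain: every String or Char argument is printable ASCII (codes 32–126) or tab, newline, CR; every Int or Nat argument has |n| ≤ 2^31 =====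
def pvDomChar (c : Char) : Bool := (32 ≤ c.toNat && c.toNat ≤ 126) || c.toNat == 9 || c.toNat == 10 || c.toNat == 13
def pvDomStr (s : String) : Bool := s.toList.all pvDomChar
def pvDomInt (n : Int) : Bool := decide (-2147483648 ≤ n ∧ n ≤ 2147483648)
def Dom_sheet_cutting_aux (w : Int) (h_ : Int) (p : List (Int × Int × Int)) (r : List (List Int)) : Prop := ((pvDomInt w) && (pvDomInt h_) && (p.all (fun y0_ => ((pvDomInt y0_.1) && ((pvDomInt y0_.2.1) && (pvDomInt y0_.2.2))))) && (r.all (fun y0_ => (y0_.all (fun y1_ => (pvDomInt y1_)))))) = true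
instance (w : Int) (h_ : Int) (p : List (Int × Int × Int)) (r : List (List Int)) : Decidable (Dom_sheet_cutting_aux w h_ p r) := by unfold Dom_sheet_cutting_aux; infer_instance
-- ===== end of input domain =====

-- B replaces A's top-down memoized recursion by a bottom-up iterative DP over the same table
-- (same recurrence, same respect for pre-filled memo cells ≥ 0); equal RETURN value — both
-- Pythons also write into r, but B may fill cells behind pre-filled memo entries that A skips.

-- shared table/dict primitives: r[a][b], r[a][b] = v, p.get((a,b), 0)
def pvGet (r : List (List Int)) (a b : Int) : Int :=
  PySem.List.pyGetD (PySem.List.pyGetD r a []) b 0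
def pvSet (r : List (List Int)) (a b v : Int) : List (List Int) :=
  PySem.List.pySetD r a (PySem.List.pySetD (PySem.List.pyGetD r a []) b v)

-- p.get((a,b),0): the dict key is the pair (a,b), flattened to (Int × Int × Int) entries;
-- first match wins (exact for a Python dict, whose keys are unique).
def pvPGet (p : List (Int × Int × Int)) (a b : Int) : Int :=
  match p.find? (fun t => t.1 == a && t.2.1 == b) with
  | some t => t.2.2
  | none => 0

-- ===== PORT A =====
-- A's memoized recursion, the mutated table threaded through the calls; the fuel argument only
-- makes the same computation total (w.toNat + h_.toNat + 1 suffices on Pre_, see runA_correct).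
def runA (p : List (Int × Int × Int)) : Nat → Int → Int → List (List Int) → Int × List (List Int)
  | 0, _, _, r => (0, r)
  | Nat.succ fuel, w, h_, r =>
    if w = 0 ∨ h_ = 0 then (0, r)
    else if 0 ≤ pvGet r w h_ then (pvGet r w h_, r)
    else
      let s1 := (PySem.List.pyRange 1 w 1).foldl (fun (s : Int × List (List Int)) i =>
        let t1 := runA p fuel i h_ s.2
        let t2 := runA p fuel (w - i) h_ t1.2
        (max s.1 (t1.1 + t2.1), t2.2)) (pvPGet p w h_, r)
      let s2 := (PySem.List.pyRange 1 h_ 1).foldl (fun (s : Int × List (List Int)) j =>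
        let t1 := runA p fuel w j s.2
        let t2 := runA p fuel w (h_ - j) t1.2
        (max s.1 (t1.1 + t2.1), t2.2)) s1
      (s2.1, pvSet s2.2 w h_ s2.1)

def sheet_cutting_aux (w : Int) (h_ : Int) (p : List (Int × Int × Int)) (r : List (List Int)) : Int :=
  (runA p (w.toNat + h_.toNat + 1) w h_ r).1

-- ===== PORT B =====
-- one cell of B's bottom-up loop body
def cellB (p : List (Int × Int × Int)) (r : List (List Int)) (ww hh : Int) : List (List Int) :=
  if 0 ≤ pvGet r ww hh then r
  else
    let q1 := (PySem.List.pyRange 1 ww 1).foldl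
      (fun q i => max q (pvGet r i hh + pvGet r (ww - i) hh)) (pvPGet p ww hh)
    let q2 := (PySem.List.pyRange 1 hh 1).foldl
      (fun q j => max q (pvGet r ww j + pvGet r ww (hh - j))) q1
    pvSet r ww hh q2

def sheet_cutting_aux_alt (w : Int) (h_ : Int) (p : List (Int × Int × Int)) (r : List (List Int)) : Int :=
  if w = 0 ∨ h_ = 0 then 0
  else
    let rF := (PySem.List.pyRange 1 (w + 1) 1).foldl (fun r ww =>
      (PySem.List.pyRange 1 (h_ + 1) 1).foldl (fun r hh => cellB p r ww hh) r) r
    pvGet rF w h_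

-- ===== PRECONDITION & SPEC =====
-- Pre_ restricts to the natural domain: either a degenerate sheet (w or h zero, both return 0
-- without touching r) or positive dimensions with the accessed part of the memo table present
-- (w < len(r), rows 1..w longer than h; rows 0 and > w are never touched). Negative dimensions
-- and undersized tables are outside the function's natural domain; there A usually raises
-- IndexError, though it can still return (via a negative index read, or a cell ≥ 0 that
-- short-circuits the recursion) where B raises or returns the cell it reads.
def Pre_sheet_cutting_aux (w : Int) (h_ : Int) (p : List (Int × Int × Int)) (r : List (List Int)) : Prop :=
  (w = 0 ∨ h_ = 0) ∨
  (1 ≤ w ∧ 1 ≤ h_ ∧ w < (r.length : Int) ∧ ∀ row ∈ (r.drop 1).take w.toNat, h_ < (row.length : Int))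
instance (w : Int) (h_ : Int) (p : List (Int × Int × Int)) (r : List (List Int)) : Decidable (Pre_sheet_cutting_aux w h_ p r) := by unfold Pre_sheet_cutting_aux; infer_instance

def pvWitness_sheet_cutting_aux : Int × Int × (List (Int × Int × Int)) × List (List Int) :=
  (2, 2, [(1, 1, 3), (1, 2, 5)], [[-1, -1, -1], [-1, -1, -1], [-1, -1, -1]])

def Spec_sheet_cutting_aux (w : Int) (h_ : Int) (p : List (Int × Int × Int)) (r : List (List Int)) (out : Int) : Prop := out = sheet_cutting_aux_alt w h_ p r
instance (w : Int) (h_ : Int) (p : List (Int × Int × Int)) (r : List (List Int)) (out : Int) : Decidable (Spec_sheet_cutting_aux w h_ p r out) := by unfold Spec_sheet_cutting_aux; infer_instance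

-- ===== CLAIM (what is proved, stated in full; the proofs are below) =====
def Claim_equal_sheet_cutting_aux : Prop := ∀ (w : Int) (h_ : Int) (p : List (Int × Int × Int)) (r : List (List Int)), Dom_sheet_cutting_aux w h_ p r → Pre_sheet_cutting_aux w h_ p r → Spec_sheet_cutting_aux w h_ p r (sheet_cutting_aux w h_ p r)

-- ===== LEMMAS AND PROOFS =====

def Dims (r0 r : List (List Int)) : Prop :=
  r.length = r0.length ∧ ∀ a : Nat, (r.getD a []).length = (r0.getD a []).length

lemma pvGet_nonneg (r : List (List Int)) (a b : Int) (ha : 0 ≤ a) (hb : 0 ≤ b) :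
    pvGet r a b = (r.getD a.toNat []).getD b.toNat 0 := by
  simp [pvGet, PySem.List.pyGetD_of_nonneg _ _ ha, PySem.List.pyGetD_of_nonneg _ _ hb]

lemma getD_set_length (r : List (List Int)) (i n : Nat) (row : List Int)
    (hrow : row.length = (r.getD i []).length) :
    ((r.set i row).getD n []).length = (r.getD n []).length := by
  simp only [List.getD]
  rcases Nat.lt_or_ge n r.length with h | h
  · by_cases hni : n = i
    · subst hni
      simp [List.getElem?_set_self h, hrow, List.getD]
    · simp [List.getElem?_set_ne (show i ≠ n by omega)]
  · rw [List.getElem?_eq_none (by simpa using h), List.getElem?_eq_none (by omega)]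

lemma pvSet_dims (r : List (List Int)) (a b v : Int) (ha : 0 ≤ a) (hb : 0 ≤ b) :
    Dims r (pvSet r a b v) := by
  refine ⟨by simp [pvSet, PySem.List.length_pySetD], fun n => ?_⟩
  simp only [pvSet, PySem.List.pySetD_of_nonneg _ _ ha, PySem.List.pySetD_of_nonneg _ _ hb,
    PySem.List.pyGetD_of_nonneg _ _ ha]
  apply getD_set_length
  simp [List.length_set]

lemma pvGet_pvSet (r : List (List Int)) (a b v a' b' : Int)
    (ha : 0 ≤ a) (hb : 0 ≤ b) (ha' : 0 ≤ a') (hb' : 0 ≤ b')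
    (hal : a.toNat < r.length) (hbl : b.toNat < (r.getD a.toNat []).length) :
    pvGet (pvSet r a b v) a' b' = if a' = a ∧ b' = b then v else pvGet r a' b' := by
  rw [pvGet_nonneg _ _ _ ha' hb']
  simp only [pvSet, PySem.List.pySetD_of_nonneg _ _ ha, PySem.List.pySetD_of_nonneg _ _ hb,
    PySem.List.pyGetD_of_nonneg _ _ ha]
  by_cases hA : a' = a
  · subst hA
    rw [show ((r.set a'.toNat ((r.getD a'.toNat []).set b.toNat v)).getD a'.toNat []) =
        ((r.getD a'.toNat []).set b.toNat v) by
      simp [List.getD, hal]]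
    by_cases hB : b' = b
    · subst hB
      have hbl' : b'.toNat < (r[a'.toNat]?.getD []).length := by simpa [List.getD] using hbl
      simp [List.getD, List.getElem?_set_self hbl']
    · have hne : b'.toNat ≠ b.toNat := fun h => hB (by omega)
      simp [List.getD, List.getElem?_set_ne (by omega : b.toNat ≠ b'.toNat), hB,
        pvGet_nonneg _ _ _ ha' hb']
  · have hne : a.toNat ≠ a'.toNat := fun h => hA (by omega)
    simp [List.getD, List.getElem?_set_ne hne, hA, pvGet_nonneg _ _ _ ha' hb']

-- the value function both programs compute: A's recurrence over the ORIGINAL table r0, stateless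
def specF (p : List (Int × Int × Int)) (r0 : List (List Int)) : Nat → Int → Int → Int
  | 0, _, _ => 0
  | Nat.succ fuel, a, b =>
    if 0 ≤ pvGet r0 a b then pvGet r0 a b
    else
      let q1 := (PySem.List.pyRange 1 a 1).foldl
        (fun q i => max q (specF p r0 fuel i b + specF p r0 fuel (a - i) b)) (pvPGet p a b)
      (PySem.List.pyRange 1 b 1).foldl
        (fun q j => max q (specF p r0 fuel a j + specF p r0 fuel a (b - j))) q1

def Fv (p : List (Int × Int × Int)) (r0 : List (List Int)) (a b : Int) : Int :=
  specF p r0 (a.toNat + b.toNat) a b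

lemma specF_irrel (p : List (Int × Int × Int)) (r0 : List (List Int)) :
    ∀ f1 f2 (a b : Int), 1 ≤ a → 1 ≤ b → a.toNat + b.toNat ≤ f1 → a.toNat + b.toNat ≤ f2 →
      specF p r0 f1 a b = specF p r0 f2 a b := by
  intro f1
  induction f1 with
  | zero => intro f2 a b ha hb h1 h2; omega
  | succ n IH =>
    intro f2 a b ha hb h1 h2
    cases f2 with
    | zero => omega
    | succ m =>
      simp only [specF]
      by_cases hr : 0 ≤ pvGet r0 a b
      · simp [hr]
      · rw [if_neg hr, if_neg hr]
        have e1 : (PySem.List.pyRange 1 a 1).foldl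
            (fun q i => max q (specF p r0 n i b + specF p r0 n (a - i) b)) (pvPGet p a b)
            = (PySem.List.pyRange 1 a 1).foldl
            (fun q i => max q (specF p r0 m i b + specF p r0 m (a - i) b)) (pvPGet p a b) := by
          apply PySem.List.foldl_congr_mem
          intro acc i hi
          rw [PySem.List.mem_pyRange_one] at hi
          rw [IH m i b (by omega) hb (by omega) (by omega),
              IH m (a - i) b (by omega) hb (by omega) (by omega)]
        rw [e1]
        apply PySem.List.foldl_congr_mem
        intro acc j hj
        rw [PySem.List.mem_pyRange_one] at hj
        rw [IH m a j ha (by omega) (by omega) (by omega),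
            IH m a (b - j) ha (by omega) (by omega) (by omega)]

lemma Fv_eq (p : List (Int × Int × Int)) (r0 : List (List Int)) (a b : Int)
    (ha : 1 ≤ a) (hb : 1 ≤ b) :
    Fv p r0 a b =
      if 0 ≤ pvGet r0 a b then pvGet r0 a b
      else
        (PySem.List.pyRange 1 b 1).foldl
          (fun q j => max q (Fv p r0 a j + Fv p r0 a (b - j)))
          ((PySem.List.pyRange 1 a 1).foldl
            (fun q i => max q (Fv p r0 i b + Fv p r0 (a - i) b)) (pvPGet p a b)) := by
  obtain ⟨k, hk⟩ : ∃ k, a.toNat + b.toNat = k + 1 := ⟨a.toNat + b.toNat - 1, by omega⟩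
  rw [Fv, hk]
  simp only [specF]
  by_cases hr : 0 ≤ pvGet r0 a b
  · simp [hr]
  · rw [if_neg hr, if_neg hr]
    have e1 : (PySem.List.pyRange 1 a 1).foldl
        (fun q i => max q (specF p r0 k i b + specF p r0 k (a - i) b)) (pvPGet p a b)
        = (PySem.List.pyRange 1 a 1).foldl
        (fun q i => max q (Fv p r0 i b + Fv p r0 (a - i) b)) (pvPGet p a b) := by
      apply PySem.List.foldl_congr_mem
      intro acc i hi
      rw [PySem.List.mem_pyRange_one] at hi
      have g1 : specF p r0 k i b = Fv p r0 i b := by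
        rw [Fv]; exact specF_irrel p r0 k _ i b (by omega) hb (by omega) (le_refl _)
      have g2 : specF p r0 k (a - i) b = Fv p r0 (a - i) b := by
        rw [Fv]; exact specF_irrel p r0 k _ (a - i) b (by omega) hb (by omega) (le_refl _)
      rw [g1, g2]
    rw [e1]
    apply PySem.List.foldl_congr_mem
    intro acc j hj
    rw [PySem.List.mem_pyRange_one] at hj
    have g1 : specF p r0 k a j = Fv p r0 a j := by
      rw [Fv]; exact specF_irrel p r0 k _ a j ha (by omega) (by omega) (le_refl _)
    have g2 : specF p r0 k a (b - j) = Fv p r0 a (b - j) := by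
      rw [Fv]; exact specF_irrel p r0 k _ a (b - j) ha (by omega) (by omega) (le_refl _)
    rw [g1, g2]

-- coherence of A's evolving memo table with the original table r0
def Coh (p : List (Int × Int × Int)) (r0 r : List (List Int)) : Prop :=
  Dims r0 r ∧ ∀ a b : Int, 0 ≤ a → 0 ≤ b →
    (0 ≤ pvGet r0 a b → pvGet r a b = pvGet r0 a b) ∧
    (pvGet r a b = pvGet r0 a b ∨ pvGet r a b = Fv p r0 a b)

lemma row_bound (r0 : List (List Int)) (W H : Int) (hW : W < (r0.length : Int))
    (hH : ∀ row ∈ (r0.drop 1).take W.toNat, H < (row.length : Int))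
    (a : Int) (ha : 1 ≤ a) (haW : a ≤ W) : H < ((r0.getD a.toNat []).length : Int) := by
  have hlen : a.toNat - 1 < ((r0.drop 1).take W.toNat).length := by
    simp only [List.length_take, List.length_drop]; omega
  have he : ((r0.drop 1).take W.toNat)[a.toNat - 1] = r0.getD a.toNat [] := by
    rw [List.getElem_take, List.getElem_drop, List.getD_eq_getElem r0 [] (by omega)]
    congr 1; omega
  have := hH _ (he ▸ List.getElem_mem hlen)
  exact this

lemma coh_write (p : List (Int × Int × Int)) (r0 : List (List Int)) (W H : Int)
    (hW : W < (r0.length : Int)) (hH : ∀ row ∈ (r0.drop 1).take W.toNat, H < (row.length : Int))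
    (a b : Int) (r : List (List Int)) (ha : 1 ≤ a) (haW : a ≤ W) (hb : 1 ≤ b) (hbH : b ≤ H)
    (hr0 : pvGet r0 a b < 0) (hC : Coh p r0 r) :
    Coh p r0 (pvSet r a b (Fv p r0 a b)) := by
  obtain ⟨⟨hL, hRows⟩, hV⟩ := hC
  have hal : a.toNat < r.length := by omega
  have hbl : b.toNat < (r.getD a.toNat []).length := by
    have := row_bound r0 W H hW hH a ha haW
    rw [hRows a.toNat]; omega
  constructor
  · obtain ⟨hL', hRows'⟩ := pvSet_dims r a b (Fv p r0 a b) (by omega) (by omega)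
    exact ⟨by omega, fun n => by rw [hRows' n, hRows n]⟩
  · intro a' b' ha' hb'
    rw [pvGet_pvSet r a b _ a' b' (by omega) (by omega) ha' hb' hal hbl]
    by_cases he : a' = a ∧ b' = b
    · obtain ⟨e1, e2⟩ := he
      subst e1; subst e2
      rw [if_pos ⟨rfl, rfl⟩]
      exact ⟨fun h0 => absurd h0 (by omega), Or.inr rfl⟩
    · rw [if_neg he]
      exact hV a' b' ha' hb'

lemma runA_correct (p : List (Int × Int × Int)) (r0 : List (List Int)) (W H : Int)
    (hW : W < (r0.length : Int)) (hH : ∀ row ∈ (r0.drop 1).take W.toNat, H < (row.length : Int)) :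
    ∀ fuel (a b : Int) (r : List (List Int)),
      1 ≤ a → a ≤ W → 1 ≤ b → b ≤ H → a.toNat + b.toNat < fuel → Coh p r0 r →
      (runA p fuel a b r).1 = Fv p r0 a b ∧ Coh p r0 (runA p fuel a b r).2 := by
  intro fuel
  induction fuel with
  | zero => intro a b r ha _ hb _ hf _; omega
  | succ n IH =>
    intro a b r ha haW hb hbH hf hC
    simp only [runA]
    rw [if_neg (by omega : ¬ (a = 0 ∨ b = 0))]
    by_cases hcur : 0 ≤ pvGet r a b
    · rw [if_pos hcur]
      refine ⟨?_, hC⟩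
      obtain ⟨hD, hV⟩ := hC
      obtain ⟨h1, h2⟩ := hV a b (by omega) (by omega)
      rcases h2 with h2 | h2
      · rw [Fv_eq p r0 a b ha hb, if_pos (h2 ▸ hcur)]; exact h2
      · exact h2
    · rw [if_neg hcur]
      have hr0 : pvGet r0 a b < 0 := by
        obtain ⟨hD, hV⟩ := hC
        obtain ⟨h1, _⟩ := hV a b (by omega) (by omega)
        by_contra hge
        exact hcur (by rw [h1 (by omega)]; omega)
      have L1 : ∀ (l : List Int), (∀ i ∈ l, 1 ≤ i ∧ i < a) → ∀ (q : Int) (r' : List (List Int)), Coh p r0 r' →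
          (l.foldl (fun (s : Int × List (List Int)) i =>
            let t1 := runA p n i b s.2
            let t2 := runA p n (a - i) b t1.2
            (max s.1 (t1.1 + t2.1), t2.2)) (q, r')).1
            = l.foldl (fun q i => max q (Fv p r0 i b + Fv p r0 (a - i) b)) q
          ∧ Coh p r0 ((l.foldl (fun (s : Int × List (List Int)) i =>
            let t1 := runA p n i b s.2
            let t2 := runA p n (a - i) b t1.2
            (max s.1 (t1.1 + t2.1), t2.2)) (q, r')).2) := by
        intro l
        induction l with
        | nil => exact fun _ q r' h => ⟨rfl, h⟩
        | cons x xs IHl =>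
          intro hmem q r' hC'
          obtain ⟨hx1, hx2⟩ := hmem x (List.mem_cons_self)
          obtain ⟨v1, c1⟩ := IH x b r' hx1 (by omega) hb hbH (by omega) hC'
          obtain ⟨v2, c2⟩ := IH (a - x) b (runA p n x b r').2 (by omega) (by omega) hb hbH (by omega) c1
          simp only [List.foldl_cons]
          obtain ⟨vr, cr⟩ := IHl (fun i hi => hmem i (List.mem_cons_of_mem _ hi))
            (max q ((runA p n x b r').1 + (runA p n (a - x) b (runA p n x b r').2).1))
            ((runA p n (a - x) b (runA p n x b r').2).2) c2
          refine ⟨?_, ?_⟩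
          · rw [vr, v1, v2]
          · exact cr
      have L2 : ∀ (l : List Int), (∀ j ∈ l, 1 ≤ j ∧ j < b) → ∀ (q : Int) (r' : List (List Int)), Coh p r0 r' →
          (l.foldl (fun (s : Int × List (List Int)) j =>
            let t1 := runA p n a j s.2
            let t2 := runA p n a (b - j) t1.2
            (max s.1 (t1.1 + t2.1), t2.2)) (q, r')).1
            = l.foldl (fun q j => max q (Fv p r0 a j + Fv p r0 a (b - j))) q
          ∧ Coh p r0 ((l.foldl (fun (s : Int × List (List Int)) j =>
            let t1 := runA p n a j s.2
            let t2 := runA p n a (b - j) t1.2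
            (max s.1 (t1.1 + t2.1), t2.2)) (q, r')).2) := by
        intro l
        induction l with
        | nil => exact fun _ q r' h => ⟨rfl, h⟩
        | cons x xs IHl =>
          intro hmem q r' hC'
          obtain ⟨hx1, hx2⟩ := hmem x (List.mem_cons_self)
          obtain ⟨v1, c1⟩ := IH a x r' ha haW hx1 (by omega) (by omega) hC'
          obtain ⟨v2, c2⟩ := IH a (b - x) (runA p n a x r').2 ha haW (by omega) (by omega) (by omega) c1
          simp only [List.foldl_cons]
          obtain ⟨vr, cr⟩ := IHl (fun j hj => hmem j (List.mem_cons_of_mem _ hj))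
            (max q ((runA p n a x r').1 + (runA p n a (b - x) (runA p n a x r').2).1))
            ((runA p n a (b - x) (runA p n a x r').2).2) c2
          refine ⟨?_, ?_⟩
          · rw [vr, v1, v2]
          · exact cr
      have hm1 : ∀ i ∈ PySem.List.pyRange 1 a 1, 1 ≤ i ∧ i < a := by
        intro i hi; exact (PySem.List.mem_pyRange_one).1 hi
      have hm2 : ∀ j ∈ PySem.List.pyRange 1 b 1, 1 ≤ j ∧ j < b := by
        intro j hj; exact (PySem.List.mem_pyRange_one).1 hj
      obtain ⟨s1v, s1c⟩ := L1 (PySem.List.pyRange 1 a 1) hm1 (pvPGet p a b) r hC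
      set S1 := (PySem.List.pyRange 1 a 1).foldl (fun (s : Int × List (List Int)) i =>
            let t1 := runA p n i b s.2
            let t2 := runA p n (a - i) b t1.2
            (max s.1 (t1.1 + t2.1), t2.2)) (pvPGet p a b, r) with hS1
      obtain ⟨s2v, s2c⟩ := L2 (PySem.List.pyRange 1 b 1) hm2 S1.1 S1.2 s1c
      have hSpair : (S1.1, S1.2) = S1 := rfl
      rw [hSpair] at s2v s2c
      set S2 := (PySem.List.pyRange 1 b 1).foldl (fun (s : Int × List (List Int)) j =>
            let t1 := runA p n a j s.2
            let t2 := runA p n a (b - j) t1.2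
            (max s.1 (t1.1 + t2.1), t2.2)) S1 with hS2
      have hval : S2.1 = Fv p r0 a b := by
        rw [Fv_eq p r0 a b ha hb, if_neg (by omega)]
        rw [s2v, s1v]
      refine ⟨hval, ?_⟩
      rw [hval]
      exact coh_write p r0 W H hW hH a b S2.2 ha haW hb hbH hr0 s2c

-- B-side invariant: cells processed so far (row-major up to (ww,hh0)) hold the value function,
-- unprocessed cells still hold their original value
def InvB (p : List (Int × Int × Int)) (r0 : List (List Int)) (H ww hh0 : Int) (r : List (List Int)) : Prop :=
  Dims r0 r ∧ ∀ a b : Int, 1 ≤ a → 1 ≤ b →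
    (((a < ww ∧ b ≤ H) ∨ (a = ww ∧ b < hh0)) → pvGet r a b = Fv p r0 a b) ∧
    (¬ ((a < ww ∧ b ≤ H) ∨ (a = ww ∧ b < hh0)) → pvGet r a b = pvGet r0 a b)

lemma cellB_step (p : List (Int × Int × Int)) (r0 : List (List Int)) (W H : Int)
    (hW : W < (r0.length : Int)) (hH : ∀ row ∈ (r0.drop 1).take W.toNat, H < (row.length : Int))
    (ww hh : Int) (r : List (List Int))
    (h1 : 1 ≤ ww) (h2 : ww ≤ W) (h3 : 1 ≤ hh) (h4 : hh ≤ H)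
    (hInv : InvB p r0 H ww hh r) :
    InvB p r0 H ww (hh + 1) (cellB p r ww hh) := by
  obtain ⟨⟨hL, hRows⟩, hV⟩ := hInv
  have hcc := hV ww hh h1 h3
  have hcur : pvGet r ww hh = pvGet r0 ww hh := hcc.2 (by omega)
  rw [cellB]
  by_cases hge : 0 ≤ pvGet r ww hh
  · rw [if_pos hge]
    refine ⟨⟨hL, hRows⟩, fun a b ha hb => ?_⟩
    obtain ⟨hp, hu⟩ := hV a b ha hb
    constructor
    · intro hreg
      by_cases he : a = ww ∧ b = hh
      · rw [he.1, he.2, hcur, Fv_eq p r0 ww hh h1 h3, if_pos (hcur ▸ hge)]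
      · exact hp (by omega)
    · intro hn
      exact hu (by omega)
  · rw [if_neg hge]
    have hr0neg : pvGet r0 ww hh < 0 := by rw [← hcur]; omega
    have e1 : (PySem.List.pyRange 1 ww 1).foldl
        (fun q i => max q (pvGet r i hh + pvGet r (ww - i) hh)) (pvPGet p ww hh)
        = (PySem.List.pyRange 1 ww 1).foldl
        (fun q i => max q (Fv p r0 i hh + Fv p r0 (ww - i) hh)) (pvPGet p ww hh) := by
      apply PySem.List.foldl_congr_mem
      intro acc i hi
      rw [PySem.List.mem_pyRange_one] at hi
      rw [(hV i hh (by omega) h3).1 (by omega), (hV (ww - i) hh (by omega) h3).1 (by omega)]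
    have e2 : ∀ q : Int, (PySem.List.pyRange 1 hh 1).foldl
        (fun q j => max q (pvGet r ww j + pvGet r ww (hh - j))) q
        = (PySem.List.pyRange 1 hh 1).foldl
        (fun q j => max q (Fv p r0 ww j + Fv p r0 ww (hh - j))) q := by
      intro q
      apply PySem.List.foldl_congr_mem
      intro acc j hj
      rw [PySem.List.mem_pyRange_one] at hj
      rw [(hV ww j h1 (by omega)).1 (by omega), (hV ww (hh - j) h1 (by omega)).1 (by omega)]
    simp only [e1, e2]
    have hqF : (PySem.List.pyRange 1 hh 1).foldl
        (fun q j => max q (Fv p r0 ww j + Fv p r0 ww (hh - j)))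
        ((PySem.List.pyRange 1 ww 1).foldl
          (fun q i => max q (Fv p r0 i hh + Fv p r0 (ww - i) hh)) (pvPGet p ww hh))
        = Fv p r0 ww hh := by
      rw [Fv_eq p r0 ww hh h1 h3, if_neg (by omega)]
    rw [hqF]
    have hal : ww.toNat < r.length := by omega
    have hbl : hh.toNat < (r.getD ww.toNat []).length := by
      have := row_bound r0 W H hW hH ww h1 h2
      rw [hRows ww.toNat]; omega
    refine ⟨?_, fun a b ha hb => ?_⟩
    · obtain ⟨hL', hRows'⟩ := pvSet_dims r ww hh (Fv p r0 ww hh) (by omega) (by omega)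
      exact ⟨by omega, fun n => by rw [hRows' n, hRows n]⟩
    · obtain ⟨hp, hu⟩ := hV a b ha hb
      rw [pvGet_pvSet r ww hh _ a b (by omega) (by omega) (by omega) (by omega) hal hbl]
      by_cases he : a = ww ∧ b = hh
      · rw [if_pos he, he.1, he.2]
        exact ⟨fun _ => rfl, fun hn => absurd (by omega) hn⟩
      · rw [if_neg he]
        exact ⟨fun hreg => hp (by omega), fun hn => hu (by omega)⟩

lemma innerB (p : List (Int × Int × Int)) (r0 : List (List Int)) (W H : Int)
    (hW : W < (r0.length : Int)) (hH : ∀ row ∈ (r0.drop 1).take W.toNat, H < (row.length : Int)) :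
    ∀ (k : Nat) (ww hh0 : Int) (r : List (List Int)),
      1 ≤ ww → ww ≤ W → 1 ≤ hh0 → hh0 + (k : Int) = H + 1 → InvB p r0 H ww hh0 r →
      InvB p r0 H ww (H + 1)
        ((PySem.List.pyRange hh0 (H + 1) 1).foldl (fun r hh => cellB p r ww hh) r) := by
  intro k
  induction k with
  | zero =>
    intro ww hh0 r _ _ _ hk hInv
    rw [PySem.List.pyRange_one_eq_nil (by omega)]
    simpa [show hh0 = H + 1 by omega] using hInv
  | succ m IHk =>
    intro ww hh0 r hww1 hwwW hh01 hk hInv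
    rw [PySem.List.pyRange_one_cons (by omega)]
    rw [List.foldl_cons]
    exact IHk ww (hh0 + 1) (cellB p r ww hh0) hww1 hwwW (by omega) (by omega)
      (cellB_step p r0 W H hW hH ww hh0 r hww1 hwwW hh01 (by omega) hInv)

lemma invB_shift (p : List (Int × Int × Int)) (r0 : List (List Int)) (H ww : Int)
    (r : List (List Int)) (h : InvB p r0 H ww (H + 1) r) : InvB p r0 H (ww + 1) 1 r := by
  obtain ⟨hD, hV⟩ := h
  refine ⟨hD, fun a b ha hb => ?_⟩
  obtain ⟨hp, hu⟩ := hV a b ha hb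
  exact ⟨fun hreg => hp (by omega), fun hn => hu (by omega)⟩

lemma outerB (p : List (Int × Int × Int)) (r0 : List (List Int)) (W H : Int)
    (hW : W < (r0.length : Int)) (hH : ∀ row ∈ (r0.drop 1).take W.toNat, H < (row.length : Int)) (hH1 : 1 ≤ H) :
    ∀ (k : Nat) (ww0 : Int) (r : List (List Int)),
      1 ≤ ww0 → ww0 + (k : Int) = W + 1 → InvB p r0 H ww0 1 r →
      InvB p r0 H (W + 1) 1
        ((PySem.List.pyRange ww0 (W + 1) 1).foldl (fun r ww =>
          (PySem.List.pyRange 1 (H + 1) 1).foldl (fun r hh => cellB p r ww hh) r) r) := by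
  intro k
  induction k with
  | zero =>
    intro ww0 r _ hk hInv
    rw [PySem.List.pyRange_one_eq_nil (a := ww0) (b := W + 1) (by omega)]
    simpa [show ww0 = W + 1 by omega] using hInv
  | succ m IHk =>
    intro ww0 r hww1 hk hInv
    rw [PySem.List.pyRange_one_cons (a := ww0) (b := W + 1) (by omega)]
    rw [List.foldl_cons]
    apply IHk (ww0 + 1) _ (by omega) (by omega)
    apply invB_shift
    have := innerB p r0 W H hW hH H.toNat ww0 1 r hww1 (by omega) (by omega) (by omega) hInv
    simpa using this

theorem main_equiv (w h_ : Int) (p : List (Int × Int × Int)) (r : List (List Int))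
    (hPre : (w = 0 ∨ h_ = 0) ∨
      (1 ≤ w ∧ 1 ≤ h_ ∧ w < (r.length : Int) ∧ ∀ row ∈ (r.drop 1).take w.toNat, h_ < (row.length : Int))) :
    sheet_cutting_aux w h_ p r = sheet_cutting_aux_alt w h_ p r := by
  by_cases hz : w = 0 ∨ h_ = 0
  · rw [sheet_cutting_aux, sheet_cutting_aux_alt, if_pos hz]
    simp only [runA]
    rw [if_pos hz]
  · obtain ⟨hw1, hh1, hW, hH⟩ : 1 ≤ w ∧ 1 ≤ h_ ∧ w < (r.length : Int) ∧
        ∀ row ∈ (r.drop 1).take w.toNat, h_ < (row.length : Int) := by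
      rcases hPre with h | h
      · exact absurd h hz
      · exact h
    have hCoh0 : Coh p r r := ⟨⟨rfl, fun n => rfl⟩, fun a b _ _ => ⟨fun _ => rfl, Or.inl rfl⟩⟩
    have hA := runA_correct p r w h_ hW hH (w.toNat + h_.toNat + 1) w h_ r
      hw1 (le_refl w) hh1 (le_refl h_) (by omega) hCoh0
    have hInv0 : InvB p r h_ 1 1 r :=
      ⟨⟨rfl, fun n => rfl⟩, fun a b ha hb => ⟨fun hreg => absurd hreg (by omega), fun _ => rfl⟩⟩
    have hB := outerB p r w h_ hW hH hh1 w.toNat 1 r (by omega) (by omega) hInv0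
    obtain ⟨_, hBV⟩ := hB
    rw [sheet_cutting_aux, sheet_cutting_aux_alt, if_neg hz]
    rw [hA.1]
    exact ((hBV w h_ hw1 hh1).1 (Or.inl ⟨by omega, le_refl h_⟩)).symm

-- ===== VERDICT (by name: the statement is the Claim_ definition above) =====
theorem sheet_cutting_aux_spec : Claim_equal_sheet_cutting_aux := by
  intro w h_ p r _ hPre
  exact main_equiv w h_ p r hPre
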